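-- pv_equiv track=rewrite | github.com/fermga/TNFR-Python-Engine | src/tnfr/matrix/operators.py | limpiar_glifo
-- ===== SOURCE A (Python) =====
-- from typing import Any, Dict, List, Tuple, Iterable
--
-- def limpiar_glifo(glifo_raw: Any) -> str:
--     """Limpia glifos que pueden tener comillas o separadores extra (A'L → AL, etc.)."""
--     s = str(glifo_raw).strip().strip("'").strip('"')
--
--     correcciones = {
--         "RE'MESH": "REMESH",
--         "T'HOL": "THOL",
--         "Z'HIR": "ZHIR",
--         "A'L": "AL",
--         "E'N": "EN",
--         "I'L": "IL",
--         "O'Z": "OZ",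
--         "U'M": "UM",
--         "R'A": "RA",
--         "SH'A": "SHA",
--         "VA'L": "VAL",
--         "NU'L": "NUL",
--         "NA'V": "NAV",
--     }
--
--     for k, v in correcciones.items():
--         if s == k or s.replace("'", "") == v:
--             return v
--
--     return s.upper()
-- ===== SOURCE B (Python) =====
-- _VALID = frozenset({
--     "REMESH", "THOL", "ZHIR", "AL", "EN", "IL", "OZ",
--     "UM", "RA", "SHA", "VAL", "NUL", "NAV",
-- })
--
-- def limpiar_glifo(glifo_raw):
--     """Limpia glifos que pueden tener comillas o separadores extra (A'L → AL, etc.)."""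
--     s = str(glifo_raw).strip().strip("'").strip('"')
--     stripped = s.replace("'", "")
--     return stripped if stripped in _VALID else s.upper()
-- ===== Notes on version B (the rewrite author's own statement) =====
-- stated objective: simpler
-- what changed: The per-entry scan over the corrections dict with an early return is replaced by removing apostrophes once and testing membership in a precomputed frozenset of the 13 valid glyph values, relying on the proved fact that every dict key equals its value after apostrophe removal.
import Mathlib
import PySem

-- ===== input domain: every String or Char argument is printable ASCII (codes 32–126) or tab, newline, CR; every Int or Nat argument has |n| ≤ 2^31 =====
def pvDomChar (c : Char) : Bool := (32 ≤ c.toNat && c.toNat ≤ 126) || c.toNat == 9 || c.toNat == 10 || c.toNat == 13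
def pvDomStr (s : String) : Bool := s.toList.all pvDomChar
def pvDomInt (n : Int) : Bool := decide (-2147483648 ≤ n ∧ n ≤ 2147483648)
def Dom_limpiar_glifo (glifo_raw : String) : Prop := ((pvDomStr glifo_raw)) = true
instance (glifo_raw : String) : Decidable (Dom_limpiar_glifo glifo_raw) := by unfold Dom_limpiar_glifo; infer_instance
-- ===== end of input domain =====

-- B replaces A's scan over the corrections dict (early return on the first pair whose
-- key matches s or whose value matches s with apostrophes removed) by one apostrophe
-- removal followed by a single membership test in the set of valid glyph values
-- (objective: simpler; same leading strip sequence and uppercase fallback).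

-- ===== PORT A =====
def correcciones : List (String × String) :=
  [("RE'MESH", "REMESH"), ("T'HOL", "THOL"), ("Z'HIR", "ZHIR"), ("A'L", "AL"),
   ("E'N", "EN"), ("I'L", "IL"), ("O'Z", "OZ"), ("U'M", "UM"), ("R'A", "RA"),
   ("SH'A", "SHA"), ("VA'L", "VAL"), ("NU'L", "NUL"), ("NA'V", "NAV")]

-- the for-loop with early return over correcciones.items()
def limpiarLoop (s : String) : List (String × String) → String
  | [] => PySem.Str.upper s
  | (k, v) :: rest =>
      if s = k ∨ PySem.Str.replace s "'" "" = v then v else limpiarLoop s rest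

def limpiar_glifo (glifo_raw : String) : String :=
  let s := PySem.Str.stripChars (PySem.Str.stripChars (PySem.Str.strip glifo_raw) "'") "\""
  limpiarLoop s correcciones

-- ===== PORT B =====
def validGlyphs : PySem.Set String :=
  PySem.Set.ofList ["REMESH", "THOL", "ZHIR", "AL", "EN", "IL", "OZ",
                    "UM", "RA", "SHA", "VAL", "NUL", "NAV"]

def limpiar_glifo_alt (glifo_raw : String) : String :=
  let s := PySem.Str.stripChars (PySem.Str.stripChars (PySem.Str.strip glifo_raw) "'") "\""
  let stripped := PySem.Str.replace s "'" ""
  if stripped ∈ validGlyphs then stripped else PySem.Str.upper s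

-- ===== PRECONDITION & SPEC =====
def Spec_limpiar_glifo (glifo_raw : String) (out : String) : Prop := out = limpiar_glifo_alt glifo_raw
instance (glifo_raw : String) (out : String) : Decidable (Spec_limpiar_glifo glifo_raw out) := by unfold Spec_limpiar_glifo; infer_instance

-- ===== CLAIM (what is proved, stated in full; the proofs are below) =====
def Claim_equal_limpiar_glifo : Prop := ∀ (glifo_raw : String), Dom_limpiar_glifo glifo_raw → Spec_limpiar_glifo glifo_raw (limpiar_glifo glifo_raw)

-- ===== LEMMAS AND PROOFS =====

-- on every pair of correcciones, matching the key forces the apostrophe-free form to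
-- match the value, so the loop's disjunction collapses to its second disjunct
theorem limpiarLoop_eq_alt (s : String) :
    limpiarLoop s correcciones =
      (if PySem.Str.replace s "'" "" ∈ validGlyphs
       then PySem.Str.replace s "'" "" else PySem.Str.upper s) := by
  set t := PySem.Str.replace s "'" "" with ht
  have c1 : (s = "RE'MESH" ∨ t = "REMESH") ↔ t = "REMESH" :=
    ⟨fun h => h.elim (fun hs => by rw [ht, hs]; decide) id, Or.inr⟩
  have c2 : (s = "T'HOL" ∨ t = "THOL") ↔ t = "THOL" :=
    ⟨fun h => h.elim (fun hs => by rw [ht, hs]; decide) id, Or.inr⟩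
  have c3 : (s = "Z'HIR" ∨ t = "ZHIR") ↔ t = "ZHIR" :=
    ⟨fun h => h.elim (fun hs => by rw [ht, hs]; decide) id, Or.inr⟩
  have c4 : (s = "A'L" ∨ t = "AL") ↔ t = "AL" :=
    ⟨fun h => h.elim (fun hs => by rw [ht, hs]; decide) id, Or.inr⟩
  have c5 : (s = "E'N" ∨ t = "EN") ↔ t = "EN" :=
    ⟨fun h => h.elim (fun hs => by rw [ht, hs]; decide) id, Or.inr⟩
  have c6 : (s = "I'L" ∨ t = "IL") ↔ t = "IL" :=
    ⟨fun h => h.elim (fun hs => by rw [ht, hs]; decide) id, Or.inr⟩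
  have c7 : (s = "O'Z" ∨ t = "OZ") ↔ t = "OZ" :=
    ⟨fun h => h.elim (fun hs => by rw [ht, hs]; decide) id, Or.inr⟩
  have c8 : (s = "U'M" ∨ t = "UM") ↔ t = "UM" :=
    ⟨fun h => h.elim (fun hs => by rw [ht, hs]; decide) id, Or.inr⟩
  have c9 : (s = "R'A" ∨ t = "RA") ↔ t = "RA" :=
    ⟨fun h => h.elim (fun hs => by rw [ht, hs]; decide) id, Or.inr⟩
  have c10 : (s = "SH'A" ∨ t = "SHA") ↔ t = "SHA" :=
    ⟨fun h => h.elim (fun hs => by rw [ht, hs]; decide) id, Or.inr⟩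
  have c11 : (s = "VA'L" ∨ t = "VAL") ↔ t = "VAL" :=
    ⟨fun h => h.elim (fun hs => by rw [ht, hs]; decide) id, Or.inr⟩
  have c12 : (s = "NU'L" ∨ t = "NUL") ↔ t = "NUL" :=
    ⟨fun h => h.elim (fun hs => by rw [ht, hs]; decide) id, Or.inr⟩
  have c13 : (s = "NA'V" ∨ t = "NAV") ↔ t = "NAV" :=
    ⟨fun h => h.elim (fun hs => by rw [ht, hs]; decide) id, Or.inr⟩
  simp only [correcciones, limpiarLoop]
  rw [← ht]
  simp only [c1, c2, c3, c4, c5, c6, c7, c8, c9, c10, c11, c12, c13]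
  have hv : validGlyphs = ["REMESH", "THOL", "ZHIR", "AL", "EN", "IL", "OZ",
                          "UM", "RA", "SHA", "VAL", "NUL", "NAV"] := by decide
  rcases eq_or_ne t "REMESH" with h1 | h1
  · simp [h1, hv]
  rcases eq_or_ne t "THOL" with h2 | h2
  · simp [h2, hv]
  rcases eq_or_ne t "ZHIR" with h3 | h3
  · simp [h3, hv]
  rcases eq_or_ne t "AL" with h4 | h4
  · simp [h4, hv]
  rcases eq_or_ne t "EN" with h5 | h5
  · simp [h5, hv]
  rcases eq_or_ne t "IL" with h6 | h6
  · simp [h6, hv]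
  rcases eq_or_ne t "OZ" with h7 | h7
  · simp [h7, hv]
  rcases eq_or_ne t "UM" with h8 | h8
  · simp [h8, hv]
  rcases eq_or_ne t "RA" with h9 | h9
  · simp [h9, hv]
  rcases eq_or_ne t "SHA" with h10 | h10
  · simp [h10, hv]
  rcases eq_or_ne t "VAL" with h11 | h11
  · simp [h11, hv]
  rcases eq_or_ne t "NUL" with h12 | h12
  · simp [h12, hv]
  rcases eq_or_ne t "NAV" with h13 | h13
  · simp [h13, hv]
  simp [h1, h2, h3, h4, h5, h6, h7, h8, h9, h10, h11, h12, h13, hv]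

-- ===== VERDICT (by name: the statement is the Claim_ definition above) =====
theorem limpiar_glifo_spec : Claim_equal_limpiar_glifo := by
  intro g _
  unfold Spec_limpiar_glifo limpiar_glifo limpiar_glifo_alt
  exact limpiarLoop_eq_alt _
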